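-- pv_equiv track=rewrite | github.com/Alto5414/GPX-Studio-GPX-File-Merger | GPX_Studio_GPX_File_Merger_No_GUI_v1.py | process_gpx_content
-- ===== SOURCE A (Python) =====
-- EXT_TRO = """<extensions>
--   <gpxx:TrackExtension>
--     <gpxx:DisplayColor>Red</gpxx:DisplayColor>
--   </gpxx:TrackExtension>
--   <gpx_style:line>
--     <gpx_style:color>FF0000</gpx_style:color>
--   </gpx_style:line>
-- </extensions>"""
--
-- EXT_TEMP_TRO = """<extensions>
--   <gpxx:TrackExtension>
--     <gpxx:DisplayColor>Blue</gpxx:DisplayColor>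
--   </gpxx:TrackExtension>
--   <gpx_style:line>
--     <gpx_style:color>0000FF</gpx_style:color>
--   </gpx_style:line>
-- </extensions>"""
--
-- EXT_PA = """<extensions>
--   <gpxx:TrackExtension>
--     <gpxx:DisplayColor>Orange</gpxx:DisplayColor>
--   </gpxx:TrackExtension>
--   <gpx_style:line>
--     <gpx_style:color>FFA500</gpx_style:color>
--   </gpx_style:line>
-- </extensions>"""
--
-- EXT_LR = """<extensions>
--   <gpxx:TrackExtension>
--     <gpxx:DisplayColor>DarkGray</gpxx:DisplayColor>
--   </gpxx:TrackExtension>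
--   <gpx_style:line>
--     <gpx_style:color>444444</gpx_style:color>
--   </gpx_style:line>
-- </extensions>"""
--
-- EXT_DEFAULT_GREEN = """<extensions>
--   <gpxx:TrackExtension>
--     <gpxx:DisplayColor>Green</gpxx:DisplayColor>
--   </gpxx:TrackExtension>
--   <gpx_style:line>
--     <gpx_style:color>00FF00</gpx_style:color>
--   </gpx_style:line>
-- </extensions>"""
--
-- def pick_extensions_block(lines):
--     """Return the <extensions> block based on the first <name> line."""
--     name_line = next((ln for ln in lines if ln.lstrip().startswith("<name>")), None)
--     if not name_line:
--         return EXT_DEFAULT_GREEN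
--
--     text = name_line
--     if "(TRO)" in text:
--         return EXT_TRO
--     if "(Temp TRO)" in text:
--         return EXT_TEMP_TRO
--     if "(PA)" in text:
--         return EXT_PA
--     if "(LR)" in text:
--         return EXT_LR
--     return EXT_DEFAULT_GREEN
--
-- def process_gpx_content(content):
--     lines = content.splitlines()
--
--     # --- Step 1: Copy <desc> to above <trkseg> ---
--     desc_idx = next((i for i, line in enumerate(lines) if line.lstrip().startswith("<desc>")), None)
--     trkseg_idx = next((i for i, line in enumerate(lines) if line.lstrip().startswith("<trkseg>")), None)
--     if desc_idx is not None and trkseg_idx is not None: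
--         desc_line = lines[desc_idx]
--         lines.insert(trkseg_idx, desc_line)
--         # If we inserted, shift trkseg index for next insertion
--         trkseg_idx += 1
--
--     # --- Step 2: Insert <extensions> block above <trkseg> ---
--     if trkseg_idx is None:
--         trkseg_idx = next((i for i, line in enumerate(lines) if line.lstrip().startswith("<trkseg>")), None)
--     if trkseg_idx is not None:
--         block = pick_extensions_block(lines)
--         block_lines = block.splitlines()
--         lines = lines[:trkseg_idx] + block_lines + lines[trkseg_idx:]
--
--     # --- Step 3: Remove everything above first <trk> ---
--     try:
--         trk_idx = next(i for i, line in enumerate(lines) if line.lstrip().startswith("<trk>"))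
--     except StopIteration:
--         raise ValueError("No <trk> tag found in GPX file!")
--
--     # --- Step 4: Remove </gpx> lines ---
--     new_lines = [line for line in lines[trk_idx:] if "</gpx>" not in line]
--
--     return "\n".join(new_lines).strip()
-- ===== SOURCE B (Python) =====
-- EXT_TRO = """<extensions>
--   <gpxx:TrackExtension>
--     <gpxx:DisplayColor>Red</gpxx:DisplayColor>
--   </gpxx:TrackExtension>
--   <gpx_style:line>
--     <gpx_style:color>FF0000</gpx_style:color>
--   </gpx_style:line>
-- </extensions>"""
--
-- EXT_TEMP_TRO = """<extensions>
--   <gpxx:TrackExtension>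
--     <gpxx:DisplayColor>Blue</gpxx:DisplayColor>
--   </gpxx:TrackExtension>
--   <gpx_style:line>
--     <gpx_style:color>0000FF</gpx_style:color>
--   </gpx_style:line>
-- </extensions>"""
--
-- EXT_PA = """<extensions>
--   <gpxx:TrackExtension>
--     <gpxx:DisplayColor>Orange</gpxx:DisplayColor>
--   </gpxx:TrackExtension>
--   <gpx_style:line>
--     <gpx_style:color>FFA500</gpx_style:color>
--   </gpx_style:line>
-- </extensions>"""
--
-- EXT_LR = """<extensions>
--   <gpxx:TrackExtension>
--     <gpxx:DisplayColor>DarkGray</gpxx:DisplayColor>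
--   </gpxx:TrackExtension>
--   <gpx_style:line>
--     <gpx_style:color>444444</gpx_style:color>
--   </gpx_style:line>
-- </extensions>"""
--
-- EXT_DEFAULT_GREEN = """<extensions>
--   <gpxx:TrackExtension>
--     <gpxx:DisplayColor>Green</gpxx:DisplayColor>
--   </gpxx:TrackExtension>
--   <gpx_style:line>
--     <gpx_style:color>00FF00</gpx_style:color>
--   </gpx_style:line>
-- </extensions>"""
--
--
-- def process_gpx_content(content):
--     """One forward pass: record the interesting lines/indices, then stream-build
--     the output from the first <trk> line onward, inserting the desc copy and the
--     extensions block right before the first <trkseg>."""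
--     lines = content.splitlines()
--     desc_line = None
--     trkseg_idx = None
--     name_line = None
--     trk_idx = None
--     for i, ln in enumerate(lines):
--         st = ln.lstrip()
--         if desc_line is None and st.startswith("<desc>"):
--             desc_line = ln
--         if trkseg_idx is None and st.startswith("<trkseg>"):
--             trkseg_idx = i
--         if name_line is None and st.startswith("<name>"):
--             name_line = ln
--         if trk_idx is None and st.startswith("<trk>"):
--             trk_idx = i
--     if trk_idx is None:
--         raise ValueError("No <trk> tag found in GPX file!")
--
--     if name_line is None:
--         block = EXT_DEFAULT_GREEN
--     elif "(TRO)" in name_line: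
--         block = EXT_TRO
--     elif "(Temp TRO)" in name_line:
--         block = EXT_TEMP_TRO
--     elif "(PA)" in name_line:
--         block = EXT_PA
--     elif "(LR)" in name_line:
--         block = EXT_LR
--     else:
--         block = EXT_DEFAULT_GREEN
--
--     out = []
--
--     def keep(line):
--         if "</gpx>" not in line:
--             out.append(line)
--
--     for i in range(trk_idx, len(lines)):
--         if i == trkseg_idx:
--             if desc_line is not None:
--                 keep(desc_line)
--             for bl in block.splitlines():
--                 keep(bl)
--         keep(lines[i])
--     return "\n".join(out).strip()
-- ===== Notes on version B (the rewrite author's own statement) =====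
-- stated objective: alternative
-- what changed: Replaces A's multi-pass insert/shift/slice pipeline (two index searches, a list.insert, a re-slice concatenation, then another search and a filtering slice) with a single recording scan over the lines followed by one forward stream-build from the first <trk> line that drops </gpx> lines and emits the desc copy and extensions block right before the first <trkseg>.
import Mathlib
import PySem

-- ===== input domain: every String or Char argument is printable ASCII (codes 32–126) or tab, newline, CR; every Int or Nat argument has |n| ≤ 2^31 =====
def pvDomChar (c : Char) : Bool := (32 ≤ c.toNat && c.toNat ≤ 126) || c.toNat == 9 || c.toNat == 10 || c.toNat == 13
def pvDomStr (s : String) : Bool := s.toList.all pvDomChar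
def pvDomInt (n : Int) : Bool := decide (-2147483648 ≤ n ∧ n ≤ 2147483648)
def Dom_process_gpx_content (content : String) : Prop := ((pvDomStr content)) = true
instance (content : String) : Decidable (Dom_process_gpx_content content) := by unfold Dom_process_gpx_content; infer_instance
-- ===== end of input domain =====

-- B replaces A's multi-pass insert/slice pipeline by one recording scan plus one
-- forward stream-build from the first <trk> line (objective: alternative decomposition).

-- module-level constants (shared by both Python files)
def EXT_TRO : String := "<extensions>\n  <gpxx:TrackExtension>\n    <gpxx:DisplayColor>Red</gpxx:DisplayColor>\n  </gpxx:TrackExtension>\n  <gpx_style:line>\n    <gpx_style:color>FF0000</gpx_style:color>\n  </gpx_style:line>\n</extensions>"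
def EXT_TEMP_TRO : String := "<extensions>\n  <gpxx:TrackExtension>\n    <gpxx:DisplayColor>Blue</gpxx:DisplayColor>\n  </gpxx:TrackExtension>\n  <gpx_style:line>\n    <gpx_style:color>0000FF</gpx_style:color>\n  </gpx_style:line>\n</extensions>"
def EXT_PA : String := "<extensions>\n  <gpxx:TrackExtension>\n    <gpxx:DisplayColor>Orange</gpxx:DisplayColor>\n  </gpxx:TrackExtension>\n  <gpx_style:line>\n    <gpx_style:color>FFA500</gpx_style:color>\n  </gpx_style:line>\n</extensions>"
def EXT_LR : String := "<extensions>\n  <gpxx:TrackExtension>\n    <gpxx:DisplayColor>DarkGray</gpxx:DisplayColor>\n  </gpxx:TrackExtension>\n  <gpx_style:line>\n    <gpx_style:color>444444</gpx_style:color>\n  </gpx_style:line>\n</extensions>"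
def EXT_DEFAULT_GREEN : String := "<extensions>\n  <gpxx:TrackExtension>\n    <gpxx:DisplayColor>Green</gpxx:DisplayColor>\n  </gpxx:TrackExtension>\n  <gpx_style:line>\n    <gpx_style:color>00FF00</gpx_style:color>\n  </gpx_style:line>\n</extensions>"

-- ===== PORT A =====
-- line.lstrip().startswith(tag)
def pvLineStarts (tag : String) (l : String) : Bool :=
  PySem.Str.startswith (PySem.Str.lstrip l) tag

def pick_extensions_block (lines : List String) : String :=
  match lines.find? (pvLineStarts "<name>") with
  | none => EXT_DEFAULT_GREEN   -- `if not name_line`: a matching line is nonempty, so this is exactly the None case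
  | some text =>
    if PySem.Str.isIn "(TRO)" text then EXT_TRO
    else if PySem.Str.isIn "(Temp TRO)" text then EXT_TEMP_TRO
    else if PySem.Str.isIn "(PA)" text then EXT_PA
    else if PySem.Str.isIn "(LR)" text then EXT_LR
    else EXT_DEFAULT_GREEN

def process_gpx_content (content : String) : String :=
  let lines0 := PySem.Str.splitlines content
  let desc_idx := lines0.findIdx? (pvLineStarts "<desc>")
  let trkseg_idx0 := lines0.findIdx? (pvLineStarts "<trkseg>")
  -- Step 1 (lines0.getD d "" is lines[desc_idx]: d is in range, the default is never used)
  let step1 : List String × Option Nat :=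
    match desc_idx, trkseg_idx0 with
    | some d, some s => (PySem.List.insert lines0 (s : Int) (lines0.getD d ""), some (s + 1))
    | _, _ => (lines0, trkseg_idx0)
  let lines1 := step1.1
  -- Step 2
  let trkseg_idx1 :=
    match step1.2 with
    | none => lines1.findIdx? (pvLineStarts "<trkseg>")
    | some s => some s
  let lines2 :=
    match trkseg_idx1 with
    | none => lines1
    | some s =>
      PySem.List.slice lines1 none (some (s : Int))
        ++ PySem.Str.splitlines (pick_extensions_block lines1)
        ++ PySem.List.slice lines1 (some (s : Int)) none
  -- Steps 3 and 4
  match lines2.findIdx? (pvLineStarts "<trk>") with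
  | none => ""   -- Python raises ValueError here; excluded by Pre_
  | some t =>
    PySem.Str.strip (PySem.Str.join "\n"
      ((PySem.List.slice lines2 (some (t : Int)) none).filter
        (fun l => !PySem.Str.isIn "</gpx>" l)))

-- ===== PORT B =====
-- the recording scan: first <desc> line, first <trkseg> index, first <name> line, first <trk> index
def pvScan : List String → Nat → Option String → Option Nat → Option String → Option Nat →
    Option String × Option Nat × Option String × Option Nat
  | [], _, d, s, nm, t => (d, s, nm, t)
  | ln :: rest, i, d, s, nm, t =>
    let st := PySem.Str.lstrip ln
    pvScan rest (i + 1)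
      (if d.isNone && PySem.Str.startswith st "<desc>" then some ln else d)
      (if s.isNone && PySem.Str.startswith st "<trkseg>" then some i else s)
      (if nm.isNone && PySem.Str.startswith st "<name>" then some ln else nm)
      (if t.isNone && PySem.Str.startswith st "<trk>" then some i else t)

-- keep(line): emit it unless it contains '</gpx>'
def pvKeep (l : String) : List String :=
  if PySem.Str.isIn "</gpx>" l then [] else [l]

-- the stream-build loop over lines[trk_idx:], i the current index in lines
def pvEmit (s? : Option Nat) (d? : Option String) (blk : List String) :
    List String → Nat → List String
  | [], _ => []
  | ln :: rest, i =>
    (if s? = some i then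
      (match d? with | some dl => pvKeep dl | none => []) ++ blk.flatMap pvKeep
     else [])
      ++ pvKeep ln ++ pvEmit s? d? blk rest (i + 1)

def process_gpx_content_alt (content : String) : String :=
  let lines := PySem.Str.splitlines content
  match pvScan lines 0 none none none none with
  | (d?, s?, nm?, t?) =>
    match t? with
    | none => ""   -- Python raises ValueError here; excluded by Pre_
    | some t =>
      let block :=
        match nm? with
        | none => EXT_DEFAULT_GREEN
        | some nl =>
          if PySem.Str.isIn "(TRO)" nl then EXT_TRO
          else if PySem.Str.isIn "(Temp TRO)" nl then EXT_TEMP_TRO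
          else if PySem.Str.isIn "(PA)" nl then EXT_PA
          else if PySem.Str.isIn "(LR)" nl then EXT_LR
          else EXT_DEFAULT_GREEN
      PySem.Str.strip (PySem.Str.join "\n"
        (pvEmit s? d? (PySem.Str.splitlines block) (lines.drop t) t))

-- ===== PRECONDITION & SPEC =====
-- Pre_ excludes exactly the inputs with no line whose lstrip starts with "<trk>":
-- there A raises ValueError ("No <trk> tag found"); B raises the same ValueError.
def Pre_process_gpx_content (content : String) : Prop :=
  ∃ l ∈ PySem.Str.splitlines content,
    PySem.Str.startswith (PySem.Str.lstrip l) "<trk>" = true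
instance (content : String) : Decidable (Pre_process_gpx_content content) := by
  unfold Pre_process_gpx_content; infer_instance

def pvWitness_process_gpx_content : String := "<trk>\n<name>a (PA)\n<desc>d\n<trkseg>\npt\n</gpx>"

def Spec_process_gpx_content (content : String) (out : String) : Prop := out = process_gpx_content_alt content
instance (content : String) (out : String) : Decidable (Spec_process_gpx_content content out) := by unfold Spec_process_gpx_content; infer_instance

-- ===== CLAIM (what is proved, stated in full; the proofs are below) =====
def Claim_equal_process_gpx_content : Prop := ∀ (content : String), Dom_process_gpx_content content → Pre_process_gpx_content content → Spec_process_gpx_content content (process_gpx_content content)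

-- ===== LEMMAS AND PROOFS =====

-- two tags neither of which is a prefix of the other cannot both start the same line
theorem pvStarts_not (t1 t2 : String) (h12 : ¬ (t1.toList <+: t2.toList))
    (h21 : ¬ (t2.toList <+: t1.toList)) (l : String)
    (h : pvLineStarts t1 l = true) : pvLineStarts t2 l = false := by
  unfold pvLineStarts at *
  rw [PySem.Str.startswith_eq] at *
  rw [PySem.Chars.startswith_iff] at h
  rw [← Bool.not_eq_true, PySem.Chars.startswith_iff]
  intro hc
  rcases Nat.le_total t2.toList.length t1.toList.length with hle | hle
  · exact h21 (List.prefix_of_prefix_length_le hc h hle)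
  · exact h12 (List.prefix_of_prefix_length_le h hc hle)

-- relating the first index and the first element
theorem pvFind?_of_findIdx? (p : String → Bool) (l : List String) (d : Nat)
    (h : l.findIdx? p = some d) : l.find? p = some (l.getD d "") := by
  rw [List.findIdx?_eq_some_iff_getElem] at h
  obtain ⟨hlt, hp, hmin⟩ := h
  rw [List.getD_eq_getElem l "" hlt]
  rw [List.find?_eq_some_iff_getElem]
  exact ⟨hp, d, hlt, rfl, fun j hj => by simpa using hmin j hj⟩

theorem pvOptAux (ln : String) (rest : List String) (p : String → Bool) (d : Option String) :
    (if d.isNone && p ln then some ln else d).or (rest.find? p) =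
      d.or (List.find? p (ln :: rest)) := by
  cases d <;> simp [List.find?_cons] <;> cases h : p ln <;> simp

theorem pvIdxAux (ln : String) (rest : List String) (p : String → Bool) (s : Option Nat) (i : Nat) :
    (if s.isNone && p ln then some i else s).or ((rest.findIdx? p).map (· + (i+1))) =
      s.or ((List.findIdx? p (ln :: rest)).map (· + i)) := by
  cases s <;> simp [List.findIdx?_cons] <;> cases h : p ln <;>
    simp [Option.map_map, Function.comp_def] <;> congr 1 <;> funext j <;> omega

-- the scan computes the four firsts
theorem pvScan_eq (l : List String) (i : Nat) (d nm : Option String) (s t : Option Nat) :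
    pvScan l i d s nm t =
      (d.or (l.find? (pvLineStarts "<desc>")),
       s.or ((l.findIdx? (pvLineStarts "<trkseg>")).map (· + i)),
       nm.or (l.find? (pvLineStarts "<name>")),
       t.or ((l.findIdx? (pvLineStarts "<trk>")).map (· + i))) := by
  induction l generalizing i d nm s t with
  | nil => simp [pvScan]
  | cons ln rest ih =>
    show pvScan rest (i+1) _ _ _ _ = _
    rw [ih]
    refine Prod.ext ?_ (Prod.ext ?_ (Prod.ext ?_ ?_)) <;> simp only
    · exact pvOptAux ln rest (pvLineStarts "<desc>") d
    · exact pvIdxAux ln rest (pvLineStarts "<trkseg>") s i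
    · exact pvOptAux ln rest (pvLineStarts "<name>") nm
    · exact pvIdxAux ln rest (pvLineStarts "<trk>") t i

theorem pvFlatMap_keep (l : List String) :
    l.flatMap pvKeep = l.filter (fun x => !PySem.Str.isIn "</gpx>" x) := by
  induction l with
  | nil => rfl
  | cons a l ih => simp [pvKeep]; split <;> simp_all

theorem pvEmit_no_hit (s? : Option Nat) (d? : Option String) (blk : List String)
    (l : List String) (i : Nat) (h : ∀ j, s? = some j → j < i) :
    pvEmit s? d? blk l i = l.flatMap pvKeep := by
  induction l generalizing i with
  | nil => rfl
  | cons a l ih =>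
    have hne : ¬ s? = some i := fun he => by have := h i he; omega
    simp [pvEmit, hne, ih (i+1) (fun j hj => by have := h j hj; omega)]

theorem pvEmit_hit (d? : Option String) (blk : List String)
    (l1 : List String) (x : String) (l2 : List String) (i : Nat) :
    pvEmit (some (i + l1.length)) d? blk (l1 ++ x :: l2) i =
      l1.flatMap pvKeep
        ++ ((match d? with | some dl => pvKeep dl | none => []) ++ blk.flatMap pvKeep)
        ++ pvKeep x ++ l2.flatMap pvKeep := by
  induction l1 generalizing i with
  | nil =>
    simp [pvEmit, pvEmit_no_hit (some i) d? blk l2 (i+1) (fun j hj => by cases hj; omega)]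
  | cons a l1 ih =>
    have harr : i + (a :: l1).length = (i+1) + l1.length := by simp; omega
    simp only [List.cons_append, pvEmit, harr, ih (i+1)]
    simp
    intro h
    exact absurd h (by omega)

def pvLines_TRO : List (List Char) := [['<', 'e', 'x', 't', 'e', 'n', 's', 'i', 'o', 'n', 's', '>'], [' ', ' ', '<', 'g', 'p', 'x', 'x', ':', 'T', 'r', 'a', 'c', 'k', 'E', 'x', 't', 'e', 'n', 's', 'i', 'o', 'n', '>'], [' ', ' ', ' ', ' ', '<', 'g', 'p', 'x', 'x', ':', 'D', 'i', 's', 'p', 'l', 'a', 'y', 'C', 'o', 'l', 'o', 'r', '>', 'R', 'e', 'd', '<', '/', 'g', 'p', 'x', 'x', ':', 'D', 'i', 's', 'p', 'l', 'a', 'y', 'C', 'o', 'l', 'o', 'r', '>'], [' ', ' ', '<', '/', 'g', 'p', 'x', 'x', ':', 'T', 'r', 'a', 'c', 'k', 'E', 'x', 't', 'e', 'n', 's', 'i', 'o', 'n', '>'], [' ', ' ', '<', 'g', 'p', 'x', '_', 's', 't', 'y', 'l', 'e', ':', 'l', 'i', 'n', 'e', '>'], [' ', ' ', ' ', ' ',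 '<', 'g', 'p', 'x', '_', 's', 't', 'y', 'l', 'e', ':', 'c', 'o', 'l', 'o', 'r', '>', 'F', 'F', '0', '0', '0', '0', '<', '/', 'g', 'p', 'x', '_', 's', 't', 'y', 'l', 'e', ':', 'c', 'o', 'l', 'o', 'r', '>'], [' ', ' ', '<', '/', 'g', 'p', 'x', '_', 's', 't', 'y', 'l', 'e', ':', 'l', 'i', 'n', 'e', '>'], ['<', '/', 'e', 'x', 't', 'e', 'n', 's', 'i', 'o', 'n', 's', '>']]
set_option maxRecDepth 100000 in
theorem pvSplit_TRO : PySem.Str.splitlines EXT_TRO = pvLines_TRO.map String.ofList := by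
  have h : EXT_TRO = String.ofList ['<', 'e', 'x', 't', 'e', 'n', 's', 'i', 'o', 'n', 's', '>', '\n', ' ', ' ', '<', 'g', 'p', 'x', 'x', ':', 'T', 'r', 'a', 'c', 'k', 'E', 'x', 't', 'e', 'n', 's', 'i', 'o', 'n', '>', '\n', ' ', ' ', ' ', ' ', '<', 'g', 'p', 'x', 'x', ':', 'D', 'i', 's', 'p', 'l', 'a', 'y', 'C', 'o', 'l', 'o', 'r', '>', 'R', 'e', 'd', '<', '/', 'g', 'p', 'x', 'x', ':', 'D', 'i', 's', 'p', 'l', 'a', 'y', 'C', 'o', 'l', 'o', 'r', '>', '\n', ' ', ' ', '<', '/', 'g', 'p', 'x', 'x', ':', 'T', 'r', 'a', 'c', 'k', 'E', 'x', 't', 'e', 'n', 's', 'i', 'o', 'n', '>', '\n', ' ', ' ', '<', 'g', 'p', 'x', '_', 's', 't', 'y', 'l', 'e', ':', 'l', 'i', 'n', 'e', '>', '\n', ' ', ' ', ' ', ' ', '<', 'g', 'p', 'x', '_', 's', 't', 'y', 'l', 'e', ':', 'c', 'o', 'l', 'o', 'r', '>', 'F', 'F', '0', '0', '0', '0', '<',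 '/', 'g', 'p', 'x', '_', 's', 't', 'y', 'l', 'e', ':', 'c', 'o', 'l', 'o', 'r', '>', '\n', ' ', ' ', '<', '/', 'g', 'p', 'x', '_', 's', 't', 'y', 'l', 'e', ':', 'l', 'i', 'n', 'e', '>', '\n', '<', '/', 'e', 'x', 't', 'e', 'n', 's', 'i', 'o', 'n', 's', '>'] := by decide
  simp only [PySem.Str.splitlines, h, String.toList_ofList]
  rw [show PySem.Chars.splitlines ['<', 'e', 'x', 't', 'e', 'n', 's', 'i', 'o', 'n', 's', '>', '\n', ' ', ' ', '<', 'g', 'p', 'x', 'x', ':', 'T', 'r', 'a', 'c', 'k', 'E', 'x', 't', 'e', 'n', 's', 'i', 'o', 'n', '>', '\n', ' ', ' ', ' ', ' ', '<', 'g', 'p', 'x', 'x', ':', 'D', 'i', 's', 'p', 'l', 'a', 'y', 'C', 'o', 'l', 'o', 'r', '>', 'R', 'e', 'd', '<', '/', 'g', 'p', 'x', 'x', ':', 'D', 'i', 's', 'p', 'l', 'a', 'y', 'C', 'o', 'l', 'o', 'r', '>', '\n', ' ', ' ', '<', '/', 'g', 'p', 'x', 'x', ':', 'T', 'r', 'a',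 'c', 'k', 'E', 'x', 't', 'e', 'n', 's', 'i', 'o', 'n', '>', '\n', ' ', ' ', '<', 'g', 'p', 'x', '_', 's', 't', 'y', 'l', 'e', ':', 'l', 'i', 'n', 'e', '>', '\n', ' ', ' ', ' ', ' ', '<', 'g', 'p', 'x', '_', 's', 't', 'y', 'l', 'e', ':', 'c', 'o', 'l', 'o', 'r', '>', 'F', 'F', '0', '0', '0', '0', '<', '/', 'g', 'p', 'x', '_', 's', 't', 'y', 'l', 'e', ':', 'c', 'o', 'l', 'o', 'r', '>', '\n', ' ', ' ', '<', '/', 'g', 'p', 'x', '_', 's', 't', 'y', 'l', 'e', ':', 'l', 'i', 'n', 'e', '>', '\n', '<', '/', 'e', 'x', 't', 'e', 'n', 's', 'i', 'o', 'n', 's', '>'] = pvLines_TRO from by decide]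

def pvLines_TEMP_TRO : List (List Char) := [['<', 'e', 'x', 't', 'e', 'n', 's', 'i', 'o', 'n', 's', '>'], [' ', ' ', '<', 'g', 'p', 'x', 'x', ':', 'T', 'r', 'a', 'c', 'k', 'E', 'x', 't', 'e', 'n', 's', 'i', 'o', 'n', '>'], [' ', ' ', ' ', ' ', '<', 'g', 'p', 'x', 'x', ':', 'D', 'i', 's', 'p', 'l', 'a', 'y', 'C', 'o', 'l', 'o', 'r', '>', 'B', 'l', 'u', 'e', '<', '/', 'g', 'p', 'x', 'x', ':', 'D', 'i', 's', 'p', 'l', 'a', 'y', 'C', 'o', 'l', 'o', 'r', '>'], [' ', ' ', '<', '/', 'g', 'p', 'x', 'x', ':', 'T', 'r', 'a', 'c', 'k', 'E', 'x', 't', 'e', 'n', 's', 'i', 'o', 'n', '>'], [' ', ' ', '<', 'g', 'p', 'x', '_', 's', 't', 'y', 'l', 'e', ':', 'l', 'i', 'n', 'e', '>'], [' ', ' ', ' ', ' ', '<', 'g', 'p', 'x', '_', 's', 't', 'y', 'l', 'e', ':', 'c', 'o', 'l', 'o', 'r', '>', '0', '0', '0', '0', 'F', 'F', '<', '/', 'g',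 'p', 'x', '_', 's', 't', 'y', 'l', 'e', ':', 'c', 'o', 'l', 'o', 'r', '>'], [' ', ' ', '<', '/', 'g', 'p', 'x', '_', 's', 't', 'y', 'l', 'e', ':', 'l', 'i', 'n', 'e', '>'], ['<', '/', 'e', 'x', 't', 'e', 'n', 's', 'i', 'o', 'n', 's', '>']]
set_option maxRecDepth 100000 in
theorem pvSplit_TEMP_TRO : PySem.Str.splitlines EXT_TEMP_TRO = pvLines_TEMP_TRO.map String.ofList := by
  have h : EXT_TEMP_TRO = String.ofList ['<', 'e', 'x', 't', 'e', 'n', 's', 'i', 'o', 'n', 's', '>', '\n', ' ', ' ', '<', 'g', 'p', 'x', 'x', ':', 'T', 'r', 'a', 'c', 'k', 'E', 'x', 't', 'e', 'n', 's', 'i', 'o', 'n', '>', '\n', ' ', ' ', ' ', ' ', '<', 'g', 'p', 'x', 'x', ':', 'D', 'i', 's', 'p', 'l', 'a', 'y', 'C', 'o', 'l', 'o', 'r', '>', 'B', 'l', 'u', 'e', '<', '/', 'g', 'p', 'x', 'x', ':', 'D', 'i', 's', 'p', 'l', 'a', 'y', 'C', 'o', 'l', 'o', 'r', '>', '\n',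 ' ', ' ', '<', '/', 'g', 'p', 'x', 'x', ':', 'T', 'r', 'a', 'c', 'k', 'E', 'x', 't', 'e', 'n', 's', 'i', 'o', 'n', '>', '\n', ' ', ' ', '<', 'g', 'p', 'x', '_', 's', 't', 'y', 'l', 'e', ':', 'l', 'i', 'n', 'e', '>', '\n', ' ', ' ', ' ', ' ', '<', 'g', 'p', 'x', '_', 's', 't', 'y', 'l', 'e', ':', 'c', 'o', 'l', 'o', 'r', '>', '0', '0', '0', '0', 'F', 'F', '<', '/', 'g', 'p', 'x', '_', 's', 't', 'y', 'l', 'e', ':', 'c', 'o', 'l', 'o', 'r', '>', '\n', ' ', ' ', '<', '/', 'g', 'p', 'x', '_', 's', 't', 'y', 'l', 'e', ':', 'l', 'i', 'n', 'e', '>', '\n', '<', '/', 'e', 'x', 't', 'e', 'n', 's', 'i', 'o', 'n', 's', '>'] := by decide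
  simp only [PySem.Str.splitlines, h, String.toList_ofList]
  rw [show PySem.Chars.splitlines ['<', 'e', 'x', 't', 'e', 'n', 's', 'i', 'o', 'n', 's', '>', '\n', ' ', ' ', '<', 'g', 'p', 'x', 'x', ':', 'T', 'r', 'a', 'c', 'k', 'E', 'x', 't', 'e', 'n', 's', 'i', 'o', 'n', '>', '\n', ' ', ' ', ' ', ' ', '<', 'g', 'p', 'x', 'x', ':', 'D', 'i', 's', 'p', 'l', 'a', 'y', 'C', 'o', 'l', 'o', 'r', '>', 'B', 'l', 'u', 'e', '<', '/', 'g', 'p', 'x', 'x', ':', 'D', 'i', 's', 'p', 'l', 'a', 'y', 'C', 'o', 'l', 'o', 'r', '>', '\n', ' ', ' ', '<', '/', 'g', 'p', 'x', 'x', ':', 'T', 'r', 'a', 'c', 'k', 'E', 'x', 't', 'e', 'n', 's', 'i', 'o', 'n', '>', '\n', ' ', ' ', '<', 'g', 'p', 'x', '_', 's', 't', 'y', 'l', 'e', ':', 'l', 'i', 'n', 'e', '>', '\n', ' ', ' ', ' ', ' ', '<', 'g', 'p', 'x', '_', 's', 't', 'y', 'l', 'e', ':', 'c', 'o', 'l',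 'o', 'r', '>', '0', '0', '0', '0', 'F', 'F', '<', '/', 'g', 'p', 'x', '_', 's', 't', 'y', 'l', 'e', ':', 'c', 'o', 'l', 'o', 'r', '>', '\n', ' ', ' ', '<', '/', 'g', 'p', 'x', '_', 's', 't', 'y', 'l', 'e', ':', 'l', 'i', 'n', 'e', '>', '\n', '<', '/', 'e', 'x', 't', 'e', 'n', 's', 'i', 'o', 'n', 's', '>'] = pvLines_TEMP_TRO from by decide]

def pvLines_PA : List (List Char) := [['<', 'e', 'x', 't', 'e', 'n', 's', 'i', 'o', 'n', 's', '>'], [' ', ' ', '<', 'g', 'p', 'x', 'x', ':', 'T', 'r', 'a', 'c', 'k', 'E', 'x', 't', 'e', 'n', 's', 'i', 'o', 'n', '>'], [' ', ' ', ' ', ' ', '<', 'g', 'p', 'x', 'x', ':', 'D', 'i', 's', 'p', 'l', 'a', 'y', 'C', 'o', 'l', 'o', 'r', '>', 'O', 'r', 'a', 'n', 'g', 'e', '<', '/', 'g', 'p', 'x', 'x', ':', 'D', 'i', 's', 'p', 'l', 'a', 'y', 'C', 'o', 'l', 'o', 'r', '>'], [' ', ' ', '<', '/', 'g', 'p', 'x',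 'x', ':', 'T', 'r', 'a', 'c', 'k', 'E', 'x', 't', 'e', 'n', 's', 'i', 'o', 'n', '>'], [' ', ' ', '<', 'g', 'p', 'x', '_', 's', 't', 'y', 'l', 'e', ':', 'l', 'i', 'n', 'e', '>'], [' ', ' ', ' ', ' ', '<', 'g', 'p', 'x', '_', 's', 't', 'y', 'l', 'e', ':', 'c', 'o', 'l', 'o', 'r', '>', 'F', 'F', 'A', '5', '0', '0', '<', '/', 'g', 'p', 'x', '_', 's', 't', 'y', 'l', 'e', ':', 'c', 'o', 'l', 'o', 'r', '>'], [' ', ' ', '<', '/', 'g', 'p', 'x', '_', 's', 't', 'y', 'l', 'e', ':', 'l', 'i', 'n', 'e', '>'], ['<', '/', 'e', 'x', 't', 'e', 'n', 's', 'i', 'o', 'n', 's', '>']]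
set_option maxRecDepth 100000 in
theorem pvSplit_PA : PySem.Str.splitlines EXT_PA = pvLines_PA.map String.ofList := by
  have h : EXT_PA = String.ofList ['<', 'e', 'x', 't', 'e', 'n', 's', 'i', 'o', 'n', 's', '>', '\n', ' ', ' ', '<', 'g', 'p', 'x', 'x', ':', 'T', 'r', 'a', 'c', 'k', 'E', 'x', 't', 'e', 'n', 's', 'i', 'o', 'n', '>', '\n', ' ', ' ', ' ', ' ', '<', 'g', 'p', 'x', 'x', ':', 'D', 'i', 's', 'p', 'l', 'a', 'y', 'C', 'o', 'l', 'o', 'r', '>', 'O', 'r', 'a', 'n', 'g', 'e', '<', '/', 'g', 'p', 'x', 'x', ':', 'D', 'i', 's', 'p', 'l', 'a', 'y', 'C', 'o', 'l', 'o', 'r', '>', '\n', ' ', ' ', '<', '/', 'g', 'p', 'x', 'x', ':', 'T', 'r', 'a', 'c', 'k', 'E', 'x', 't', 'e', 'n', 's', 'i', 'o', 'n', '>', '\n', ' ', ' ', '<', 'g', 'p', 'x', '_', 's', 't', 'y', 'l', 'e', ':', 'l', 'i', 'n', 'e', '>', '\n', ' ', ' ', ' ', ' ', '<', 'g', 'p',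 'x', '_', 's', 't', 'y', 'l', 'e', ':', 'c', 'o', 'l', 'o', 'r', '>', 'F', 'F', 'A', '5', '0', '0', '<', '/', 'g', 'p', 'x', '_', 's', 't', 'y', 'l', 'e', ':', 'c', 'o', 'l', 'o', 'r', '>', '\n', ' ', ' ', '<', '/', 'g', 'p', 'x', '_', 's', 't', 'y', 'l', 'e', ':', 'l', 'i', 'n', 'e', '>', '\n', '<', '/', 'e', 'x', 't', 'e', 'n', 's', 'i', 'o', 'n', 's', '>'] := by decide
  simp only [PySem.Str.splitlines, h, String.toList_ofList]
  rw [show PySem.Chars.splitlines ['<', 'e', 'x', 't', 'e', 'n', 's', 'i', 'o', 'n', 's', '>', '\n', ' ', ' ', '<', 'g', 'p', 'x', 'x', ':', 'T', 'r', 'a', 'c', 'k', 'E', 'x', 't', 'e', 'n', 's', 'i', 'o', 'n', '>', '\n', ' ', ' ', ' ', ' ', '<', 'g', 'p', 'x', 'x', ':', 'D', 'i', 's', 'p', 'l', 'a', 'y', 'C', 'o', 'l', 'o', 'r', '>', 'O', 'r', 'a', 'n', 'g', 'e', '<', '/', 'g', 'p', 'x', 'x', ':', 'D', 'i', 's', 'p',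 'l', 'a', 'y', 'C', 'o', 'l', 'o', 'r', '>', '\n', ' ', ' ', '<', '/', 'g', 'p', 'x', 'x', ':', 'T', 'r', 'a', 'c', 'k', 'E', 'x', 't', 'e', 'n', 's', 'i', 'o', 'n', '>', '\n', ' ', ' ', '<', 'g', 'p', 'x', '_', 's', 't', 'y', 'l', 'e', ':', 'l', 'i', 'n', 'e', '>', '\n', ' ', ' ', ' ', ' ', '<', 'g', 'p', 'x', '_', 's', 't', 'y', 'l', 'e', ':', 'c', 'o', 'l', 'o', 'r', '>', 'F', 'F', 'A', '5', '0', '0', '<', '/', 'g', 'p', 'x', '_', 's', 't', 'y', 'l', 'e', ':', 'c', 'o', 'l', 'o', 'r', '>', '\n', ' ', ' ', '<', '/', 'g', 'p', 'x', '_', 's', 't', 'y', 'l', 'e', ':', 'l', 'i', 'n', 'e', '>', '\n', '<', '/', 'e', 'x', 't', 'e', 'n', 's', 'i', 'o', 'n', 's', '>'] = pvLines_PA from by decide]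

def pvLines_LR : List (List Char) := [['<', 'e', 'x', 't', 'e', 'n', 's', 'i', 'o', 'n', 's', '>'], [' ', ' ', '<', 'g', 'p', 'x', 'x', ':', 'T', 'r', 'a', 'c', 'k', 'E', 'x', 't', 'e', 'n', 's', 'i', 'o', 'n', '>'], [' ', ' ', ' ', ' ', '<', 'g', 'p', 'x', 'x', ':', 'D', 'i', 's', 'p', 'l', 'a', 'y', 'C', 'o', 'l', 'o', 'r', '>', 'D', 'a', 'r', 'k', 'G', 'r', 'a', 'y', '<', '/', 'g', 'p', 'x', 'x', ':', 'D', 'i', 's', 'p', 'l', 'a', 'y', 'C', 'o', 'l', 'o', 'r', '>'], [' ', ' ', '<', '/', 'g', 'p', 'x', 'x', ':', 'T', 'r', 'a', 'c', 'k', 'E', 'x', 't', 'e', 'n', 's', 'i', 'o', 'n', '>'], [' ', ' ', '<', 'g', 'p', 'x', '_', 's', 't', 'y', 'l', 'e', ':', 'l', 'i', 'n', 'e', '>'], [' ', ' ', ' ', ' ', '<', 'g', 'p', 'x', '_', 's', 't', 'y', 'l', 'e', ':', 'c', 'o', 'l', 'o', 'r', '>', '4', '4', '4', '4', '4', '4',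 '<', '/', 'g', 'p', 'x', '_', 's', 't', 'y', 'l', 'e', ':', 'c', 'o', 'l', 'o', 'r', '>'], [' ', ' ', '<', '/', 'g', 'p', 'x', '_', 's', 't', 'y', 'l', 'e', ':', 'l', 'i', 'n', 'e', '>'], ['<', '/', 'e', 'x', 't', 'e', 'n', 's', 'i', 'o', 'n', 's', '>']]
set_option maxRecDepth 100000 in
theorem pvSplit_LR : PySem.Str.splitlines EXT_LR = pvLines_LR.map String.ofList := by
  have h : EXT_LR = String.ofList ['<', 'e', 'x', 't', 'e', 'n', 's', 'i', 'o', 'n', 's', '>', '\n', ' ', ' ', '<', 'g', 'p', 'x', 'x', ':', 'T', 'r', 'a', 'c', 'k', 'E', 'x', 't', 'e', 'n', 's', 'i', 'o', 'n', '>', '\n', ' ', ' ', ' ', ' ', '<', 'g', 'p', 'x', 'x', ':', 'D', 'i', 's', 'p', 'l', 'a', 'y', 'C', 'o', 'l', 'o', 'r', '>', 'D', 'a', 'r', 'k', 'G', 'r', 'a', 'y', '<', '/', 'g', 'p', 'x', 'x', ':', 'D', 'i', 's', 'p', 'l', 'a', 'y', 'C', 'o', 'l', 'o', 'r', '>', '\n',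 ' ', ' ', '<', '/', 'g', 'p', 'x', 'x', ':', 'T', 'r', 'a', 'c', 'k', 'E', 'x', 't', 'e', 'n', 's', 'i', 'o', 'n', '>', '\n', ' ', ' ', '<', 'g', 'p', 'x', '_', 's', 't', 'y', 'l', 'e', ':', 'l', 'i', 'n', 'e', '>', '\n', ' ', ' ', ' ', ' ', '<', 'g', 'p', 'x', '_', 's', 't', 'y', 'l', 'e', ':', 'c', 'o', 'l', 'o', 'r', '>', '4', '4', '4', '4', '4', '4', '<', '/', 'g', 'p', 'x', '_', 's', 't', 'y', 'l', 'e', ':', 'c', 'o', 'l', 'o', 'r', '>', '\n', ' ', ' ', '<', '/', 'g', 'p', 'x', '_', 's', 't', 'y', 'l', 'e', ':', 'l', 'i', 'n', 'e', '>', '\n', '<', '/', 'e', 'x', 't', 'e', 'n', 's', 'i', 'o', 'n', 's', '>'] := by decide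
  simp only [PySem.Str.splitlines, h, String.toList_ofList]
  rw [show PySem.Chars.splitlines ['<', 'e', 'x', 't', 'e', 'n', 's', 'i', 'o', 'n', 's', '>', '\n', ' ', ' ', '<', 'g', 'p', 'x', 'x', ':', 'T', 'r', 'a', 'c', 'k', 'E', 'x', 't', 'e', 'n', 's', 'i', 'o', 'n', '>', '\n', ' ', ' ', ' ', ' ', '<', 'g', 'p', 'x', 'x', ':', 'D', 'i', 's', 'p', 'l', 'a', 'y', 'C', 'o', 'l', 'o', 'r', '>', 'D', 'a', 'r', 'k', 'G', 'r', 'a', 'y', '<', '/', 'g', 'p', 'x', 'x', ':', 'D', 'i', 's', 'p', 'l', 'a', 'y', 'C', 'o', 'l', 'o', 'r', '>', '\n', ' ', ' ', '<', '/', 'g', 'p', 'x', 'x', ':', 'T', 'r', 'a', 'c', 'k', 'E', 'x', 't', 'e', 'n', 's', 'i', 'o', 'n', '>', '\n', ' ', ' ', '<', 'g', 'p', 'x', '_', 's', 't', 'y', 'l', 'e', ':', 'l', 'i', 'n', 'e', '>', '\n', ' ', ' ', ' ', ' ', '<', 'g', 'p', 'x', '_', 's', 't', 'y', 'l', 'e',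 ':', 'c', 'o', 'l', 'o', 'r', '>', '4', '4', '4', '4', '4', '4', '<', '/', 'g', 'p', 'x', '_', 's', 't', 'y', 'l', 'e', ':', 'c', 'o', 'l', 'o', 'r', '>', '\n', ' ', ' ', '<', '/', 'g', 'p', 'x', '_', 's', 't', 'y', 'l', 'e', ':', 'l', 'i', 'n', 'e', '>', '\n', '<', '/', 'e', 'x', 't', 'e', 'n', 's', 'i', 'o', 'n', 's', '>'] = pvLines_LR from by decide]

def pvLines_DEFAULT_GREEN : List (List Char) := [['<', 'e', 'x', 't', 'e', 'n', 's', 'i', 'o', 'n', 's', '>'], [' ', ' ', '<', 'g', 'p', 'x', 'x', ':', 'T', 'r', 'a', 'c', 'k', 'E', 'x', 't', 'e', 'n', 's', 'i', 'o', 'n', '>'], [' ', ' ', ' ', ' ', '<', 'g', 'p', 'x', 'x', ':', 'D', 'i', 's', 'p', 'l', 'a', 'y', 'C', 'o', 'l', 'o', 'r', '>', 'G', 'r', 'e', 'e', 'n', '<', '/', 'g', 'p', 'x', 'x', ':', 'D', 'i', 's', 'p', 'l', 'a', 'y', 'C', 'o', 'l', 'o', 'r', '>'], [' ', ' ', '<',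 '/', 'g', 'p', 'x', 'x', ':', 'T', 'r', 'a', 'c', 'k', 'E', 'x', 't', 'e', 'n', 's', 'i', 'o', 'n', '>'], [' ', ' ', '<', 'g', 'p', 'x', '_', 's', 't', 'y', 'l', 'e', ':', 'l', 'i', 'n', 'e', '>'], [' ', ' ', ' ', ' ', '<', 'g', 'p', 'x', '_', 's', 't', 'y', 'l', 'e', ':', 'c', 'o', 'l', 'o', 'r', '>', '0', '0', 'F', 'F', '0', '0', '<', '/', 'g', 'p', 'x', '_', 's', 't', 'y', 'l', 'e', ':', 'c', 'o', 'l', 'o', 'r', '>'], [' ', ' ', '<', '/', 'g', 'p', 'x', '_', 's', 't', 'y', 'l', 'e', ':', 'l', 'i', 'n', 'e', '>'], ['<', '/', 'e', 'x', 't', 'e', 'n', 's', 'i', 'o', 'n', 's', '>']]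
set_option maxRecDepth 100000 in
theorem pvSplit_DEFAULT_GREEN : PySem.Str.splitlines EXT_DEFAULT_GREEN = pvLines_DEFAULT_GREEN.map String.ofList := by
  have h : EXT_DEFAULT_GREEN = String.ofList ['<', 'e', 'x', 't', 'e', 'n', 's', 'i', 'o', 'n', 's', '>', '\n', ' ', ' ', '<', 'g', 'p', 'x', 'x', ':', 'T', 'r', 'a', 'c', 'k', 'E', 'x', 't', 'e', 'n', 's', 'i', 'o', 'n', '>', '\n', ' ', ' ', ' ', ' ', '<', 'g', 'p', 'x', 'x', ':', 'D', 'i', 's', 'p', 'l', 'a', 'y', 'C', 'o', 'l', 'o', 'r', '>', 'G', 'r', 'e', 'e', 'n', '<', '/', 'g', 'p', 'x', 'x', ':', 'D', 'i', 's', 'p', 'l', 'a', 'y', 'C', 'o', 'l', 'o', 'r', '>', '\n', ' ', ' ', '<', '/', 'g', 'p', 'x', 'x', ':', 'T', 'r', 'a', 'c', 'k', 'E', 'x', 't', 'e', 'n', 's', 'i', 'o', 'n', '>', '\n', ' ', ' ', '<', 'g', 'p', 'x', '_', 's', 't', 'y', 'l', 'e', ':', 'l', 'i', 'n', 'e', '>',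 '\n', ' ', ' ', ' ', ' ', '<', 'g', 'p', 'x', '_', 's', 't', 'y', 'l', 'e', ':', 'c', 'o', 'l', 'o', 'r', '>', '0', '0', 'F', 'F', '0', '0', '<', '/', 'g', 'p', 'x', '_', 's', 't', 'y', 'l', 'e', ':', 'c', 'o', 'l', 'o', 'r', '>', '\n', ' ', ' ', '<', '/', 'g', 'p', 'x', '_', 's', 't', 'y', 'l', 'e', ':', 'l', 'i', 'n', 'e', '>', '\n', '<', '/', 'e', 'x', 't', 'e', 'n', 's', 'i', 'o', 'n', 's', '>'] := by decide
  simp only [PySem.Str.splitlines, h, String.toList_ofList]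
  rw [show PySem.Chars.splitlines ['<', 'e', 'x', 't', 'e', 'n', 's', 'i', 'o', 'n', 's', '>', '\n', ' ', ' ', '<', 'g', 'p', 'x', 'x', ':', 'T', 'r', 'a', 'c', 'k', 'E', 'x', 't', 'e', 'n', 's', 'i', 'o', 'n', '>', '\n', ' ', ' ', ' ', ' ', '<', 'g', 'p', 'x', 'x', ':', 'D', 'i', 's', 'p', 'l', 'a', 'y', 'C', 'o', 'l', 'o', 'r', '>', 'G', 'r', 'e', 'e', 'n', '<', '/', 'g', 'p', 'x', 'x', ':', 'D', 'i', 's', 'p', 'l', 'a', 'y', 'C', 'o', 'l', 'o', 'r', '>', '\n', ' ', ' ', '<', '/', 'g', 'p', 'x', 'x', ':', 'T', 'r', 'a', 'c', 'k', 'E', 'x', 't', 'e', 'n', 's', 'i', 'o', 'n', '>', '\n', ' ', ' ', '<', 'g', 'p', 'x', '_', 's', 't', 'y', 'l', 'e', ':', 'l', 'i', 'n', 'e', '>', '\n', ' ', ' ', ' ', ' ', '<', 'g', 'p', 'x', '_', 's', 't', 'y', 'l', 'e', ':', 'c', 'o', 'l', 'o', 'r', '>', '0', '0', 'F', 'F',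 '0', '0', '<', '/', 'g', 'p', 'x', '_', 's', 't', 'y', 'l', 'e', ':', 'c', 'o', 'l', 'o', 'r', '>', '\n', ' ', ' ', '<', '/', 'g', 'p', 'x', '_', 's', 't', 'y', 'l', 'e', ':', 'l', 'i', 'n', 'e', '>', '\n', '<', '/', 'e', 'x', 't', 'e', 'n', 's', 'i', 'o', 'n', 's', '>'] = pvLines_DEFAULT_GREEN from by decide]

-- lines given as char lists that pass the two checks are clean
theorem pvClean (bL : List (List Char))
    (hall : (bL.all (fun cs =>
      !PySem.Chars.startswith (PySem.Chars.lstrip cs) ['<','t','r','k','>']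
      && !PySem.Chars.isIn ['<','/','g','p','x','>'] cs)) = true) :
    (∀ l ∈ bL.map String.ofList, pvLineStarts "<trk>" l = false)
    ∧ (bL.map String.ofList).filter (fun x => !PySem.Str.isIn "</gpx>" x)
        = bL.map String.ofList := by
  have htrk : "<trk>".toList = ['<','t','r','k','>'] := by decide
  rw [List.all_eq_true] at hall
  constructor
  · intro l hl
    rw [List.mem_map] at hl
    obtain ⟨cs, hcs, rfl⟩ := hl
    have := hall cs hcs
    unfold pvLineStarts
    simp only [PySem.Str.startswith_eq, PySem.Str.toList_lstrip, String.toList_ofList, htrk]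
    simp at this
    simp [this.1]
  · rw [List.filter_eq_self]
    intro l hl
    rw [List.mem_map] at hl
    obtain ⟨cs, hcs, rfl⟩ := hl
    have := hall cs hcs
    simp only [PySem.Str.isIn_eq, String.toList_ofList]
    simp at this
    simp [this.2]

-- no line of any extensions block starts with "<trk>" or contains "</gpx>"
theorem pvBlock_clean (lines : List String) :
    (∀ l ∈ PySem.Str.splitlines (pick_extensions_block lines), pvLineStarts "<trk>" l = false)
    ∧ (PySem.Str.splitlines (pick_extensions_block lines)).filter
        (fun x => !PySem.Str.isIn "</gpx>" x) = PySem.Str.splitlines (pick_extensions_block lines) := by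
  have hmem : pick_extensions_block lines ∈
      [EXT_TRO, EXT_TEMP_TRO, EXT_PA, EXT_LR, EXT_DEFAULT_GREEN] := by
    unfold pick_extensions_block
    split
    · simp
    · split_ifs <;> simp
  simp only [List.mem_cons, List.not_mem_nil, or_false] at hmem
  rcases hmem with h | h | h | h | h <;> rw [h]
  · rw [pvSplit_TRO]; exact pvClean _ (by decide)
  · rw [pvSplit_TEMP_TRO]; exact pvClean _ (by decide)
  · rw [pvSplit_PA]; exact pvClean _ (by decide)
  · rw [pvSplit_LR]; exact pvClean _ (by decide)
  · rw [pvSplit_DEFAULT_GREEN]; exact pvClean _ (by decide)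

theorem pvInsert_eq (L : List String) (s : Nat) (hs : s ≤ L.length) (x : String) :
    PySem.List.insert L (s : Int) x = L.take s ++ x :: L.drop s := by
  simp [PySem.List.insert, PySem.List.sliceIndices]
  have h : (if (s:Int) < 0 then max ((s:Int) + (L.length:Int)) 0
      else min (s:Int) (L.length:Int)).toNat = s := by
    rw [if_neg (by omega)]
    omega
  rw [h]

-- ===== VERDICT (by name: the statement is the Claim_ definition above) =====
theorem pvDrop_calc (A B : List String) (i : Nat) (h : A.length ≤ i) :
    (A ++ B).drop i = B.drop (i - A.length) := by
  rw [List.drop_append, List.drop_eq_nil_of_le h]; rfl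

theorem pvIdx_left (P Q : List String) (p : String → Bool) (u : Nat)
    (hP : P.findIdx? p = some u) : (P ++ Q).findIdx? p = some u := by
  rw [List.findIdx?_append, hP]; rfl

theorem pvIdx_right (P Q : List String) (p : String → Bool) (v : Nat)
    (hP : P.findIdx? p = none) (hQ : Q.findIdx? p = some v) :
    (P ++ Q).findIdx? p = some (v + P.length) := by
  rw [List.findIdx?_append, hP, hQ]; rfl

theorem pvIdx_none (P Q : List String) (p : String → Bool)
    (hP : P.findIdx? p = none) (hQ : Q.findIdx? p = none) :
    (P ++ Q).findIdx? p = none := by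
  rw [List.findIdx?_append, hP, hQ]; rfl

theorem process_gpx_content_spec : Claim_equal_process_gpx_content := by
  intro content _hdom hpre
  unfold Spec_process_gpx_content process_gpx_content process_gpx_content_alt
  unfold Pre_process_gpx_content at hpre
  generalize hL : PySem.Str.splitlines content = L
  rw [hL] at hpre
  obtain ⟨t0, ht0⟩ : ∃ t0, L.findIdx? (pvLineStarts "<trk>") = some t0 := by
    cases h : L.findIdx? (pvLineStarts "<trk>") with
    | some t => exact ⟨t, rfl⟩
    | none =>
      rw [List.findIdx?_eq_none_iff] at h
      obtain ⟨l, hl, hp⟩ := hpre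
      have hh := h l hl
      unfold pvLineStarts at hh
      rw [hp] at hh
      cases hh
  obtain ⟨htlt, htp, htmin⟩ := List.findIdx?_eq_some_iff_getElem.mp ht0
  simp only [pvScan_eq, Option.none_or, Nat.add_zero, Option.map_id']
  cases hs : L.findIdx? (pvLineStarts "<trkseg>") with
  | none =>
    cases hdi : L.findIdx? (pvLineStarts "<desc>") with
    | none =>
      simp only [hs, hdi, ht0]
      rw [PySem.List.slice_from_natCast,
        pvEmit_no_hit _ _ _ _ _ (by intro j hj; exact absurd hj (by simp)),
        pvFlatMap_keep]
    | some dIdx =>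
      simp only [hs, hdi, ht0]
      rw [PySem.List.slice_from_natCast,
        pvEmit_no_hit _ _ _ _ _ (by intro j hj; exact absurd hj (by simp)),
        pvFlatMap_keep]
  | some s =>
    obtain ⟨hslt, hsp, hsmin⟩ := List.findIdx?_eq_some_iff_getElem.mp hs
    have hlentake : (L.take s).length = s := by simp [hslt.le]
    have hsne : s ≠ t0 := by
      intro he
      have hfalse := pvStarts_not "<trkseg>" "<trk>" (by decide) (by decide) _ hsp
      subst he
      rw [htp] at hfalse
      cases hfalse
    cases hdi : L.findIdx? (pvLineStarts "<desc>") with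
    | none =>
      have hdf : L.find? (pvLineStarts "<desc>") = none := by
        rw [List.find?_eq_none]
        rw [List.findIdx?_eq_none_iff] at hdi
        exact fun x hx => by simp [hdi x hx]
      simp only [hs, hdi, hdf, ht0]
      rw [PySem.List.slice_to_natCast, PySem.List.slice_from_natCast]
      have hblk : (match L.find? (pvLineStarts "<name>") with
        | none => EXT_DEFAULT_GREEN
        | some nl =>
          if PySem.Str.isIn "(TRO)" nl then EXT_TRO
          else if PySem.Str.isIn "(Temp TRO)" nl then EXT_TEMP_TRO
          else if PySem.Str.isIn "(PA)" nl then EXT_PA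
          else if PySem.Str.isIn "(LR)" nl then EXT_LR
          else EXT_DEFAULT_GREEN) = pick_extensions_block L := by
        unfold pick_extensions_block; rfl
      rw [hblk]
      rcases Nat.lt_or_ge t0 s with hts | hts
      · have hf1 : (L.take s).findIdx? (pvLineStarts "<trk>") = some t0 := by
          have h := List.findIdx?_append (xs := L.take s) (ys := L.drop s)
            (p := pvLineStarts "<trk>")
          rw [List.take_append_drop, ht0] at h
          cases hf : (L.take s).findIdx? (pvLineStarts "<trk>") with
          | some u => rw [hf] at h; simp at h; simp [hf, h]
          | none =>
            rw [hf] at h; simp at h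
            obtain ⟨v, hv, hvt⟩ := h
            exact absurd hvt (by omega)
        have hA2 : (L.take s ++ PySem.Str.splitlines (pick_extensions_block L)
            ++ L.drop s).findIdx? (pvLineStarts "<trk>") = some t0 := by
          rw [List.append_assoc]; exact pvIdx_left _ _ _ _ hf1
        rw [hA2]
        dsimp only
        rw [PySem.List.slice_from_natCast, List.append_assoc,
          List.drop_append_of_le_length (by rw [hlentake]; omega)]
        obtain ⟨x, l2, hx⟩ : ∃ x l2, L.drop s = x :: l2 := by
          cases hd : L.drop s with
          | nil => exact absurd (congrArg List.length hd) (by simp; omega)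
          | cons x l2 => exact ⟨x, l2, rfl⟩
        have hdropt0 : L.drop t0 = (L.take s).drop t0 ++ L.drop s := by
          conv_lhs => rw [← List.take_append_drop s L]
          rw [List.drop_append_of_le_length (by rw [hlentake]; omega)]
        rw [hdropt0, hx]
        have hsome : (some s : Option Nat) = some (t0 + ((L.take s).drop t0).length) := by
          congr 1
          simp [List.length_drop]
          omega
        rw [hsome, pvEmit_hit]
        simp only [pvFlatMap_keep, List.filter_append, List.filter_cons]
        by_cases hgx : PySem.Str.isIn "</gpx>" x <;>
          simp [pvKeep, hgx, List.append_assoc, -PySem.Str.isIn_eq]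
      · have hst : s < t0 := by omega
        have hf1 : (L.take s).findIdx? (pvLineStarts "<trk>") = none := by
          cases hf : (L.take s).findIdx? (pvLineStarts "<trk>") with
          | none => rfl
          | some u =>
            exfalso
            have h := List.findIdx?_append (xs := L.take s) (ys := L.drop s)
              (p := pvLineStarts "<trk>")
            rw [List.take_append_drop, ht0, hf] at h
            simp at h
            obtain ⟨hult, -, -⟩ := List.findIdx?_eq_some_iff_getElem.mp hf
            rw [List.length_take] at hult
            omega
        have hblkN : (PySem.Str.splitlines (pick_extensions_block L)).findIdx?
            (pvLineStarts "<trk>") = none := by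
          rw [List.findIdx?_eq_none_iff]; exact (pvBlock_clean L).1
        have hf2 : (L.drop s).findIdx? (pvLineStarts "<trk>") = some (t0 - s) := by
          have h := List.findIdx?_append (xs := L.take s) (ys := L.drop s)
            (p := pvLineStarts "<trk>")
          rw [List.take_append_drop, ht0, hf1] at h
          simp at h
          obtain ⟨v, hv, hvt⟩ := h
          rw [hv]
          congr 1
          omega
        have hA2 : (L.take s ++ PySem.Str.splitlines (pick_extensions_block L)
            ++ L.drop s).findIdx? (pvLineStarts "<trk>")
            = some ((t0 - s) + (L.take s ++ PySem.Str.splitlines (pick_extensions_block L)).length) :=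
          pvIdx_right _ _ _ _ (pvIdx_none _ _ _ hf1 hblkN) hf2
        rw [hA2]
        dsimp only
        rw [PySem.List.slice_from_natCast,
          pvDrop_calc _ _ _ (by omega), Nat.add_sub_cancel, List.drop_drop,
          show s + (t0 - s) = t0 from by omega,
          pvEmit_no_hit _ _ _ _ _
            (by intro j hj; have := Option.some.inj hj; omega),
          pvFlatMap_keep]
    | some dIdx =>
      have hdf : L.find? (pvLineStarts "<desc>") = some (L.getD dIdx "") :=
        pvFind?_of_findIdx? _ _ _ hdi
      have hdesc : pvLineStarts "<desc>" (L.getD dIdx "") = true := List.find?_some hdf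
      simp only [hs, hdi, hdf, ht0]
      rw [pvInsert_eq L s (le_of_lt hslt)]
      rw [PySem.List.slice_to_natCast, PySem.List.slice_from_natCast]
      have hdtrk : pvLineStarts "<trk>" (L.getD dIdx "") = false :=
        pvStarts_not "<desc>" "<trk>" (by decide) (by decide) _ hdesc
      have hdname : pvLineStarts "<name>" (L.getD dIdx "") = false :=
        pvStarts_not "<desc>" "<name>" (by decide) (by decide) _ hdesc
      have htake1 : (L.take s ++ L.getD dIdx "" :: L.drop s).take (s+1)
          = L.take s ++ [L.getD dIdx ""] := by
        rw [List.take_append, List.take_take, hlentake,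
          show min (s+1) s = s from by omega, show s + 1 - s = 1 from by omega]
        simp
      have hdrop1 : (L.take s ++ L.getD dIdx "" :: L.drop s).drop (s+1) = L.drop s := by
        rw [List.drop_append, hlentake, List.drop_eq_nil_of_le (by rw [hlentake]; omega),
          show s + 1 - s = 1 from by omega]
        simp
      rw [htake1, hdrop1]
      have hname1 : (L.take s ++ L.getD dIdx "" :: L.drop s).find? (pvLineStarts "<name>")
          = L.find? (pvLineStarts "<name>") := by
        rw [List.find?_append]
        simp only [List.find?_cons, hdname]
        rw [← List.find?_append, List.take_append_drop]
      have hblk : (match L.find? (pvLineStarts "<name>") with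
        | none => EXT_DEFAULT_GREEN
        | some nl =>
          if PySem.Str.isIn "(TRO)" nl then EXT_TRO
          else if PySem.Str.isIn "(Temp TRO)" nl then EXT_TEMP_TRO
          else if PySem.Str.isIn "(PA)" nl then EXT_PA
          else if PySem.Str.isIn "(LR)" nl then EXT_LR
          else EXT_DEFAULT_GREEN)
          = pick_extensions_block (L.take s ++ L.getD dIdx "" :: L.drop s) := by
        unfold pick_extensions_block
        rw [hname1]
      rw [hblk]
      rcases Nat.lt_or_ge t0 s with hts | hts
      · have hf1 : (L.take s).findIdx? (pvLineStarts "<trk>") = some t0 := by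
          have h := List.findIdx?_append (xs := L.take s) (ys := L.drop s)
            (p := pvLineStarts "<trk>")
          rw [List.take_append_drop, ht0] at h
          cases hf : (L.take s).findIdx? (pvLineStarts "<trk>") with
          | some u => rw [hf] at h; simp at h; simp [hf, h]
          | none =>
            rw [hf] at h; simp at h
            obtain ⟨v, hv, hvt⟩ := h
            exact absurd hvt (by omega)
        have hA2 : ((L.take s ++ [L.getD dIdx ""])
            ++ PySem.Str.splitlines (pick_extensions_block (L.take s ++ L.getD dIdx "" :: L.drop s))
            ++ L.drop s).findIdx? (pvLineStarts "<trk>") = some t0 := by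
          rw [List.append_assoc, List.append_assoc]
          exact pvIdx_left _ _ _ _ hf1
        rw [hA2]
        dsimp only
        rw [PySem.List.slice_from_natCast, List.append_assoc, List.append_assoc,
          List.drop_append_of_le_length (by rw [hlentake]; omega)]
        obtain ⟨x, l2, hx⟩ : ∃ x l2, L.drop s = x :: l2 := by
          cases hd : L.drop s with
          | nil => exact absurd (congrArg List.length hd) (by simp; omega)
          | cons x l2 => exact ⟨x, l2, rfl⟩
        have hdropt0 : L.drop t0 = (L.take s).drop t0 ++ L.drop s := by
          conv_lhs => rw [← List.take_append_drop s L]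
          rw [List.drop_append_of_le_length (by rw [hlentake]; omega)]
        rw [hdropt0, hx]
        have hsome : (some s : Option Nat) = some (t0 + ((L.take s).drop t0).length) := by
          congr 1
          simp [List.length_drop]
          omega
        rw [hsome, pvEmit_hit]
        simp only [pvFlatMap_keep, List.filter_append, List.filter_cons]
        by_cases hgd : PySem.Str.isIn "</gpx>" (L.getD dIdx "") <;>
          by_cases hgx : PySem.Str.isIn "</gpx>" x <;>
            simp [pvKeep, hgd, hgx, List.append_assoc, -PySem.Str.isIn_eq,
              -List.getD_eq_getElem?_getD]
      · have hst : s < t0 := by omega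
        have hf1 : (L.take s).findIdx? (pvLineStarts "<trk>") = none := by
          cases hf : (L.take s).findIdx? (pvLineStarts "<trk>") with
          | none => rfl
          | some u =>
            exfalso
            have h := List.findIdx?_append (xs := L.take s) (ys := L.drop s)
              (p := pvLineStarts "<trk>")
            rw [List.take_append_drop, ht0, hf] at h
            simp at h
            obtain ⟨hult, -, -⟩ := List.findIdx?_eq_some_iff_getElem.mp hf
            rw [List.length_take] at hult
            omega
        have hdlN : ([L.getD dIdx ""] : List String).findIdx? (pvLineStarts "<trk>") = none := by
          simp [List.findIdx?_cons, hdtrk, -List.getD_eq_getElem?_getD]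
        have hblkN : (PySem.Str.splitlines (pick_extensions_block
            (L.take s ++ L.getD dIdx "" :: L.drop s))).findIdx?
            (pvLineStarts "<trk>") = none := by
          rw [List.findIdx?_eq_none_iff]
          exact (pvBlock_clean _).1
        have hf2 : (L.drop s).findIdx? (pvLineStarts "<trk>") = some (t0 - s) := by
          have h := List.findIdx?_append (xs := L.take s) (ys := L.drop s)
            (p := pvLineStarts "<trk>")
          rw [List.take_append_drop, ht0, hf1] at h
          simp at h
          obtain ⟨v, hv, hvt⟩ := h
          rw [hv]
          congr 1
          omega
        have hA2 : ((L.take s ++ [L.getD dIdx ""])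
            ++ PySem.Str.splitlines (pick_extensions_block (L.take s ++ L.getD dIdx "" :: L.drop s))
            ++ L.drop s).findIdx? (pvLineStarts "<trk>")
            = some ((t0 - s) + ((L.take s ++ [L.getD dIdx ""])
              ++ PySem.Str.splitlines (pick_extensions_block (L.take s ++ L.getD dIdx "" :: L.drop s))).length) :=
          pvIdx_right _ _ _ _ (pvIdx_none _ _ _ (pvIdx_none _ _ _ hf1 hdlN) hblkN) hf2
        rw [hA2]
        dsimp only
        rw [PySem.List.slice_from_natCast,
          pvDrop_calc _ _ _ (by omega), Nat.add_sub_cancel, List.drop_drop,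
          show s + (t0 - s) = t0 from by omega,
          pvEmit_no_hit _ _ _ _ _
            (by intro j hj; have := Option.some.inj hj; omega),
          pvFlatMap_keep]
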